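-- pv_equiv track=rewrite | github.com/jmaidens/Codility | TapeEquilibrium.py | solution
-- ===== SOURCE A (Python) =====
-- def solution(A):
--
-- 	N = len(A)
--
-- 	# Create array of prefix sums
-- 	prefix_sums = [A[0]]
-- 	for i in range(N-1):
-- 		prefix_sums.append(prefix_sums[i] + A[i+1])
--
-- 	# Iterate though all differences, keeping the smallest
-- 	# Each difference can be evaluated in time O(1)
-- 	min_difference = abs(prefix_sums[N-1] - 2*prefix_sums[0])
-- 	for i in range(N-1):
-- 		min_difference = min(min_difference,
-- 							 abs(prefix_sums[N-1] - 2*prefix_sums[i]))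
--
-- 	return min_difference
-- ===== SOURCE B (Python) =====
-- def solution(A):
--     # Different algorithm: sort the candidate prefix sums, then binary-search for
--     # the prefix sum closest to total/2 (the minimizer of |total - 2*p|).
--     total = sum(A)
--     ps = []
--     s = 0
--     for x in A[:len(A) - 1]:
--         s += x
--         ps.append(s)
--     if not ps:
--         ps.append(A[0])  # N == 1: the single split term is A[0] (empty A raises here, like A)
--     ps.sort()
--     # first index with 2*ps[i] >= total
--     lo, hi = 0, len(ps)
--     while lo < hi:
--         mid = (lo + hi) // 2
--         if 2 * ps[mid] < total:
--             lo = mid + 1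
--         else:
--             hi = mid
--     best = None
--     if lo < len(ps):
--         best = 2 * ps[lo] - total
--     if lo > 0:
--         d = total - 2 * ps[lo - 1]
--         if best is None or d < best:
--             best = d
--     return best
-- ===== Notes on version B (the rewrite author's own statement) =====
-- stated objective: alternative
-- what changed: B replaces A's scan over all split differences with a sort-and-binary-search: it sorts the candidate prefix sums and binary-searches for the one closest to total/2, which minimizes |total - 2*p|; only the (at most two) neighbours of the insertion point are inspected.
import Mathlib
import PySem

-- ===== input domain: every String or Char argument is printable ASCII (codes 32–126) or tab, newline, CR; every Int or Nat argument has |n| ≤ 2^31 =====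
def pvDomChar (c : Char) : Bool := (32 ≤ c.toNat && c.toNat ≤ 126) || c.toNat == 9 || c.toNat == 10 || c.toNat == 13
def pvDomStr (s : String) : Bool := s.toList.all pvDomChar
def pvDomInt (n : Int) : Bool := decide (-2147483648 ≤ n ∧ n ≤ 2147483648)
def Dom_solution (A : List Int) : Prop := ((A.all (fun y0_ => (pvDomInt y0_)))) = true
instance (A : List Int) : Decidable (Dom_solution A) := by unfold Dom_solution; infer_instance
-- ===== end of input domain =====

-- B finds the minimal split difference by sorting the candidate prefix sums and binary-searching
-- for the prefix sum closest to total/2 (an alternative algorithm, O(n log n) vs A's linear scan);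
-- both raise IndexError on the empty list, excluded by Pre_solution.


-- ===== PORT A =====
-- literal port of A; under Pre_solution (A ≠ []) every index below is in range, so List.getD
-- is exact for the Python indexing (all indices are nonnegative and < length).
def solution (A : List Int) : Int :=
  match A with
  | [] => 0  -- Python raises IndexError here; excluded by Pre_solution
  | a :: _ =>
    let N : Nat := A.length
    let ps : List Int :=
      (List.range (N - 1)).foldl (fun ps i => ps ++ [ps.getD i 0 + A.getD (i + 1) 0]) [a]
    let m0 : Int := |ps.getD (N - 1) 0 - 2 * ps.getD 0 0|
    (List.range (N - 1)).foldl (fun m i => min m |ps.getD (N - 1) 0 - 2 * ps.getD i 0|) m0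

-- ===== PORT B =====
-- the while-loop binary search of Source B: first index in [lo,hi) with 2*ps[i] >= T
def bsearchB (ps : List Int) (T : Int) (lo hi : Nat) : Nat :=
  if _h : lo < hi then
    if 2 * ps.getD ((lo + hi) / 2) 0 < T then bsearchB ps T ((lo + hi) / 2 + 1) hi
    else bsearchB ps T lo ((lo + hi) / 2)
  else lo
termination_by hi - lo
decreasing_by
  · omega
  · omega

-- the tail of Source B after the loop: inspect the neighbours of the insertion point
def pvSelect (ps : List Int) (T : Int) (lo : Nat) : Int :=
  let best : Option Int := if lo < ps.length then some (2 * ps.getD lo 0 - T) else none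
  if 0 < lo then
    let d := T - 2 * ps.getD (lo - 1) 0
    match best with
    | none => d
    | some b => if d < b then d else b
  else
    match best with
    | some b => b
    | none => 0  -- unreachable when ps ≠ []

def solution_alt (A : List Int) : Int :=
  match A with
  | [] => 0  -- Python raises IndexError (A[0]) here; excluded by Pre_solution
  | a :: _ =>
    let total : Int := A.sum
    let ps0 : List Int :=
      ((PySem.List.slice A none (some ((A.length : Int) - 1))).foldl
        (fun (st : List Int × Int) x => (st.1 ++ [st.2 + x], st.2 + x)) ([], 0)).1
    let ps1 : List Int := if ps0 = [] then ps0 ++ [a] else ps0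
    let ps : List Int := PySem.List.sorted ps1 (fun x => x) false
    pvSelect ps total (bsearchB ps total 0 ps.length)

-- ===== PRECONDITION & SPEC =====
-- A indexes the first element, so the empty list raises IndexError; only that input is excluded.
def Pre_solution (A : List Int) : Prop := A ≠ []
instance (A : List Int) : Decidable (Pre_solution A) := by unfold Pre_solution; infer_instance
def pvWitness_solution : List Int := [3, 1, 2, 4, 3]

def Spec_solution (A : List Int) (out : Int) : Prop := out = solution_alt A
instance (A : List Int) (out : Int) : Decidable (Spec_solution A out) := by unfold Spec_solution; infer_instance

-- ===== CLAIM (what is proved, stated in full; the proofs are below) =====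
def Claim_equal_solution : Prop := ∀ (A : List Int), Dom_solution A → Pre_solution A → Spec_solution A (solution A)

-- ===== LEMMAS AND PROOFS =====

-- ---- generic min-fold characterisation ----

theorem foldl_min_mem (l : List Int) : ∀ (x : Int), l.foldl min x ∈ x :: l := by
  induction l with
  | nil => intro x; simp
  | cons y t ih =>
    intro x
    simp only [List.foldl_cons]
    rcases min_choice x y with hm | hm
    · rw [hm]; have h := ih x; simp only [List.mem_cons] at h ⊢; tauto
    · rw [hm]; have h := ih y; simp only [List.mem_cons] at h ⊢; tauto

theorem foldl_min_le (l : List Int) : ∀ (x : Int), ∀ b ∈ x :: l, l.foldl min x ≤ b := by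
  induction l with
  | nil => intro x b hb; simp at hb; simp [hb]
  | cons y t ih =>
    intro x b hb
    simp only [List.foldl_cons]
    simp only [List.mem_cons] at hb
    rcases hb with h1 | h1 | h1
    · calc t.foldl min (min x y) ≤ min x y := ih _ _ (by simp)
        _ ≤ x := min_le_left _ _
        _ = b := h1.symm
    · calc t.foldl min (min x y) ≤ min x y := ih _ _ (by simp)
        _ ≤ y := min_le_right _ _
        _ = b := h1.symm
    · exact ih (min x y) b (by simp [h1])

-- two values that are each a member and a lower bound of lists with the same members are equal
theorem min_unique {v w : Int} {V W : List Int}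
    (hsame : ∀ z, z ∈ V ↔ z ∈ W)
    (hv : v ∈ V) (hlv : ∀ b ∈ V, v ≤ b)
    (hw : w ∈ W) (hlw : ∀ b ∈ W, w ≤ b) : v = w :=
  le_antisymm (hlv w ((hsame w).mpr hw)) (hlw v ((hsame v).mp hv))

-- ---- A-side: the prefix-sum table ----

theorem ps_eq (a : Int) (l : List Int) :
    ∀ k, k ≤ l.length →
      (List.range k).foldl (fun ps i => ps ++ [ps.getD i 0 + (a :: l).getD (i + 1) 0]) [a]
        = (List.range (k + 1)).map (fun i => a + (l.take i).sum) := by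
  intro k
  induction k with
  | zero => intro _; simp
  | succ k ih =>
    intro hk
    rw [List.range_succ, List.foldl_append, ih (by omega)]
    rw [List.range_succ (n := k + 1), List.map_append]
    simp only [List.foldl_cons, List.foldl_nil]
    congr 1
    · have h1 : ((List.range (k + 1)).map (fun i => a + (l.take i).sum)).getD k 0
          = a + (l.take k).sum := by
        rw [List.getD_eq_getElem?_getD, List.getElem?_map]
        simp
      have h2 : (a :: l).getD (k + 1) 0 = l[k] := by
        simp [List.getD_eq_getElem?_getD, List.getElem?_eq_getElem (by omega : k < l.length)]
        rfl
      rw [h1, h2]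
      simp [List.sum_take_succ l k (by omega), add_assoc]
      rfl

theorem pscan_getD (a : Int) (l : List Int) (i : Nat) (h : i ≤ l.length) :
    ((List.range (l.length + 1)).map (fun i => a + (l.take i).sum)).getD i 0
      = a + (l.take i).sum := by
  rw [List.getD_eq_getElem?_getD, List.getElem?_map]
  simp [List.getElem?_range (by omega : i < l.length + 1)]

-- ---- B-side: the candidate list built by the running-sum loop ----

theorem build_ps (xs : List Int) : ∀ (acc : List Int) (s : Int),
    (xs.foldl (fun (st : List Int × Int) x => (st.1 ++ [st.2 + x], st.2 + x)) (acc, s)).1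
      = acc ++ (List.range xs.length).map (fun i => s + (xs.take (i + 1)).sum) := by
  induction xs with
  | nil => intro acc s; simp
  | cons x t ih =>
    intro acc s
    simp only [List.foldl_cons]
    rw [ih]
    rw [List.length_cons, List.range_succ_eq_map, List.map_cons, List.map_map]
    simp [Function.comp, add_assoc, List.append_assoc]

-- ---- B-side: binary search invariant ----

theorem bsearch_inv (ps : List Int) (T : Int)
    (hmono : ∀ i j, i ≤ j → j < ps.length → ps.getD i 0 ≤ ps.getD j 0) :
    ∀ (n lo hi : Nat), hi - lo = n → lo ≤ hi → hi ≤ ps.length →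
      (∀ j, j < lo → 2 * ps.getD j 0 < T) →
      (∀ j, hi ≤ j → j < ps.length → T ≤ 2 * ps.getD j 0) →
      (∀ j, j < bsearchB ps T lo hi → 2 * ps.getD j 0 < T) ∧
      (∀ j, bsearchB ps T lo hi ≤ j → j < ps.length → T ≤ 2 * ps.getD j 0) ∧
      bsearchB ps T lo hi ≤ ps.length := by
  intro n
  induction n using Nat.strong_induction_on with
  | _ n ihn =>
    intro lo hi hfuel hlh hhi hlo hup
    rw [bsearchB]
    by_cases h : lo < hi
    · simp only [h, dif_pos]
      by_cases hc : 2 * ps.getD ((lo + hi) / 2) 0 < T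
      · simp only [hc, if_pos]
        refine ihn (hi - ((lo + hi) / 2 + 1)) (by omega) ((lo + hi) / 2 + 1) hi rfl (by omega) hhi ?_ hup
        intro j hj
        have hm := hmono j ((lo + hi) / 2) (by omega) (by omega)
        omega
      · simp only [hc, if_neg, not_false_iff]
        refine ihn ((lo + hi) / 2 - lo) (by omega) lo ((lo + hi) / 2) rfl (by omega) (by omega) hlo ?_
        intro j hj1 hj2
        have hm := hmono ((lo + hi) / 2) j hj1 hj2
        omega
    · simp only [h, dif_neg, not_false_iff]
      refine ⟨hlo, ?_, by omega⟩
      intro j hj1 hj2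
      exact hup j (by omega) hj2

-- ---- B-side: the neighbour selection returns the minimum of the mapped values ----

theorem getD_mem {ps : List Int} {j : Nat} (hj : j < ps.length) : ps.getD j 0 ∈ ps := by
  rw [List.getD_eq_getElem?_getD, List.getElem?_eq_getElem hj]
  exact List.getElem_mem hj

theorem select_spec (ps : List Int) (T : Int) (hne : ps ≠ [])
    (hmono : ∀ i j, i ≤ j → j < ps.length → ps.getD i 0 ≤ ps.getD j 0)
    (r : Nat) (hr : r ≤ ps.length)
    (P1 : ∀ j, j < r → 2 * ps.getD j 0 < T)
    (P2 : ∀ j, r ≤ j → j < ps.length → T ≤ 2 * ps.getD j 0) :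
    pvSelect ps T r ∈ ps.map (fun p => |T - 2 * p|) ∧
      ∀ b ∈ ps.map (fun p => |T - 2 * p|), pvSelect ps T r ≤ b := by
  have hlen : 0 < ps.length := List.length_pos_iff.mpr hne
  have hmemf : ∀ j, j < ps.length → |T - 2 * ps.getD j 0| ∈ ps.map (fun p => |T - 2 * p|) :=
    fun j hj => List.mem_map.mpr ⟨ps.getD j 0, getD_mem hj, rfl⟩
  have hb_form : ∀ b ∈ ps.map (fun p => |T - 2 * p|),
      ∃ j, j < ps.length ∧ b = |T - 2 * ps.getD j 0| := by
    intro b hb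
    rcases List.mem_map.mp hb with ⟨p, hp, rfl⟩
    rcases List.mem_iff_getElem.mp hp with ⟨j, hj, rfl⟩
    exact ⟨j, hj, by rw [List.getD_eq_getElem?_getD, List.getElem?_eq_getElem hj]; rfl⟩
  -- the two neighbour values written as absolute values
  have hlow : ∀ j, j < r → |T - 2 * ps.getD j 0| = T - 2 * ps.getD j 0 :=
    fun j hj => abs_of_pos (by have := P1 j hj; omega)
  have hhigh : ∀ j, r ≤ j → j < ps.length → |T - 2 * ps.getD j 0| = 2 * ps.getD j 0 - T := by
    intro j h1 h2
    have := P2 j h1 h2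
    rw [abs_sub_comm]; exact abs_of_nonneg (by omega)
  rcases Nat.lt_or_ge 0 r with hr0 | hr0
  · rcases Nat.lt_or_ge r ps.length with hrl | hrl
    · -- 0 < r < len : min of the two neighbours
      have hval : pvSelect ps T r
          = if T - 2 * ps.getD (r - 1) 0 < 2 * ps.getD r 0 - T
            then T - 2 * ps.getD (r - 1) 0 else 2 * ps.getD r 0 - T := by
        unfold pvSelect; simp [hrl, hr0]
      rw [hval]
      have hmd : T - 2 * ps.getD (r - 1) 0 = |T - 2 * ps.getD (r - 1) 0| :=
        (hlow (r - 1) (by omega)).symm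
      have hmb : 2 * ps.getD r 0 - T = |T - 2 * ps.getD r 0| :=
        (hhigh r le_rfl hrl).symm
      constructor
      · split_ifs with hdb
        · rw [hmd]; exact hmemf _ (by omega)
        · rw [hmb]; exact hmemf _ hrl
      · intro b hb
        rcases hb_form b hb with ⟨j, hj, rfl⟩
        rcases Nat.lt_or_ge j r with hjr | hjr
        · have h1 : T - 2 * ps.getD (r - 1) 0 ≤ |T - 2 * ps.getD j 0| := by
            rw [hlow j hjr]
            have := hmono j (r - 1) (by omega) (by omega)
            omega
          split_ifs with hdb
          · exact h1
          · exact le_trans (not_lt.mp hdb) h1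
        · have h1 : 2 * ps.getD r 0 - T ≤ |T - 2 * ps.getD j 0| := by
            rw [hhigh j hjr hj]
            have := hmono r j hjr hj
            omega
          split_ifs with hdb
          · exact le_trans (le_of_lt hdb) h1
          · exact h1
    · -- r = len : only the left neighbour exists
      have hval : pvSelect ps T r = T - 2 * ps.getD (r - 1) 0 := by
        unfold pvSelect; simp [Nat.not_lt.mpr hrl, hr0]
      rw [hval]
      constructor
      · rw [(hlow (r - 1) (by omega)).symm]
        exact hmemf _ (by omega)
      · intro b hb
        rcases hb_form b hb with ⟨j, hj, rfl⟩
        rw [hlow j (by omega)]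
        have := hmono j (r - 1) (by omega) (by omega)
        omega
  · -- r = 0 : only the right neighbour exists
    have hr' : r = 0 := by omega
    subst hr'
    have hval : pvSelect ps T 0 = 2 * ps.getD 0 0 - T := by
      unfold pvSelect; simp [hlen]
    rw [hval]
    constructor
    · rw [(hhigh 0 le_rfl hlen).symm]
      exact hmemf 0 hlen
    · intro b hb
      rcases hb_form b hb with ⟨j, hj, rfl⟩
      rw [hhigh j (Nat.zero_le _) hj]
      have := hmono 0 j (Nat.zero_le _) hj
      omega

theorem getD_eq_getElem' {ps : List Int} {j : Nat} (hj : j < ps.length) :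
    ps.getD j 0 = ps[j] := by
  rw [List.getD_eq_getElem?_getD, List.getElem?_eq_getElem hj]; rfl

-- ---- main equality ----

theorem main_eq (a : Int) (l : List Int) : solution (a :: l) = solution_alt (a :: l) := by
  set n := l.length with hnl
  set g : Nat → Int := fun i => |a + l.sum - 2 * (a + (l.take i).sum)| with hg
  set C : List Int := (List.range (max n 1)).map (fun i => a + (l.take i).sum) with hC
  -- ---------- A's value as a min-fold ----------
  have hn : (a :: l).length - 1 = n := by simp [hnl]
  have hA : solution (a :: l) = ((List.range n).map g).foldl min (g 0) := by
    rw [solution]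
    simp only [hn]
    rw [ps_eq a l n le_rfl]
    have hcong : ∀ (m0 : Int),
        (List.range n).foldl (fun m i =>
          min m |((List.range (n + 1)).map (fun i => a + (l.take i).sum)).getD n 0
            - 2 * ((List.range (n + 1)).map (fun i => a + (l.take i).sum)).getD i 0|) m0
        = (List.range n).foldl (fun m i => min m (g i)) m0 := by
      intro m0
      apply PySem.List.foldl_congr_mem
      intro acc i hi
      rw [pscan_getD a l n le_rfl, pscan_getD a l i (by simp at hi; omega)]
      rw [hnl, List.take_length]
    rw [hcong]
    rw [pscan_getD a l n le_rfl, pscan_getD a l 0 (by omega)]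
    rw [hnl, List.take_length, List.foldl_map]
  -- ---------- B's value via pvSelect ----------
  have hB : solution_alt (a :: l)
      = pvSelect (PySem.List.sorted C (fun x => x) false) (a + l.sum)
          (bsearchB (PySem.List.sorted C (fun x => x) false) (a + l.sum) 0
            (PySem.List.sorted C (fun x => x) false).length) := by
    rw [solution_alt]
    have hlen : ((a :: l).length : Int) - 1 = ((n : Nat) : Int) := by simp [hnl]
    rw [hlen, PySem.List.slice_to_natCast, build_ps]
    have hsum : (a :: l).sum = a + l.sum := by simp
    have hps1 : (if ([] : List Int) ++ (List.range ((a :: l).take n).length).map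
          (fun i => 0 + (((a :: l).take n).take (i + 1)).sum) = []
        then ([] : List Int) ++ (List.range ((a :: l).take n).length).map
          (fun i => 0 + (((a :: l).take n).take (i + 1)).sum) ++ [a]
        else ([] : List Int) ++ (List.range ((a :: l).take n).length).map
          (fun i => 0 + (((a :: l).take n).take (i + 1)).sum)) = C := by
      rcases Nat.eq_zero_or_pos n with hn0 | hnpos
      · rw [hn0]
        simp only [List.take_zero, List.length_nil, List.range_zero, List.map_nil,
          List.nil_append]
        rw [hC, hn0]
        simp
      · have htake : (a :: l).take n = a :: l.take (n - 1) := by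
          have h1 : n = (n - 1) + 1 := by omega
          rw [h1, List.take_succ_cons]
          simp
        rw [htake]
        have hlen2 : (a :: l.take (n - 1)).length = n := by simp [hnl]; omega
        rw [hlen2]
        have hmapeq : (List.range n).map (fun i => 0 + ((a :: l.take (n - 1)).take (i + 1)).sum)
            = C := by
          rw [hC, Nat.max_eq_left hnpos]
          apply List.map_congr_left
          intro i hi
          have hi' : i < n := by simpa using hi
          rw [List.take_succ_cons, List.take_take]
          simp [Nat.min_eq_left (by omega : i ≤ n - 1)]
        rw [hmapeq]
        have hCne : C ≠ [] := by
          rw [hC]; simp [Nat.max_eq_left hnpos]; omega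
        simp [hCne]
    rw [hps1, hsum]
  -- ---------- shared notation ----------
  set T : Int := a + l.sum with hT
  set f : Int → Int := fun p => |T - 2 * p| with hf
  set ps : List Int := PySem.List.sorted C (fun x => x) false with hps
  have hpslen : ps.length = max n 1 := by
    rw [hps, PySem.List.length_sorted, hC]; simp
  have hpsne : ps ≠ [] := by
    intro h
    rw [hps, PySem.List.sorted_eq_nil_iff, hC] at h
    rw [List.map_eq_nil_iff, List.range_eq_nil] at h
    omega
  have hmono : ∀ i j, i ≤ j → j < ps.length → ps.getD i 0 ≤ ps.getD j 0 := by
    intro i j hij hj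
    rcases eq_or_lt_of_le hij with rfl | hlt
    · exact le_refl _
    · have hpw : ps.Pairwise (· ≤ ·) := by
        rw [hps]
        simpa using PySem.List.sorted_pairwise (xs := C) (key := fun x => x)
      have := List.pairwise_iff_getElem.mp hpw i j (by omega) hj hlt
      rw [getD_eq_getElem' (by omega : i < ps.length), getD_eq_getElem' hj]
      exact this
  -- binary-search invariants
  obtain ⟨P1, P2, hr⟩ := bsearch_inv ps T hmono ps.length 0 ps.length (by omega) (by omega)
    le_rfl (fun j hj => absurd hj (by omega))
    (fun j h1 h2 => absurd (lt_of_le_of_lt h1 h2) (lt_irrefl _))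
  obtain ⟨hBmem, hBlb⟩ := select_spec ps T hpsne hmono _ hr P1 P2
  -- A's value: member and lower bound of g-image
  have hAmem0 := foldl_min_mem ((List.range n).map g) (g 0)
  have hAlb0 := foldl_min_le ((List.range n).map g) (g 0)
  -- the two value lists have the same members
  have hVeq : (C.map f) = (List.range (max n 1)).map g := by
    rw [hC, List.map_map]
    apply List.map_congr_left
    intro i _
    simp [hf, hg]
  have hsame : ∀ z, z ∈ g 0 :: (List.range n).map g ↔ z ∈ ps.map f := by
    intro z
    have h1 : z ∈ ps.map f ↔ z ∈ C.map f := by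
      constructor
      · intro hz; rcases List.mem_map.mp hz with ⟨p, hp, rfl⟩
        exact List.mem_map.mpr ⟨p, (PySem.List.mem_sorted _ _ _ _).mp (hps ▸ hp), rfl⟩
      · intro hz; rcases List.mem_map.mp hz with ⟨p, hp, rfl⟩
        refine List.mem_map.mpr ⟨p, ?_, rfl⟩
        rw [hps]
        exact (PySem.List.mem_sorted _ _ _ _).mpr hp
    rw [h1, hVeq]
    constructor
    · intro hz
      rcases List.mem_cons.mp hz with rfl | hz'
      · exact List.mem_map.mpr ⟨0, by simp, rfl⟩
      · rcases List.mem_map.mp hz' with ⟨i, hi, rfl⟩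
        exact List.mem_map.mpr ⟨i, by simp at hi ⊢; omega, rfl⟩
    · intro hz
      rcases List.mem_map.mp hz with ⟨i, hi, rfl⟩
      have hi' : i < max n 1 := by simpa using hi
      rcases Nat.lt_or_ge i n with hin | hin
      · exact List.mem_cons.mpr (Or.inr (List.mem_map.mpr ⟨i, by simpa using hin, rfl⟩))
      · have : i = 0 := by omega
        rw [this]
        exact List.mem_cons.mpr (Or.inl rfl)
  rw [hA, hB]
  exact min_unique hsame hAmem0 hAlb0 hBmem hBlb

-- ===== VERDICT (by name: the statement is the Claim_ definition above) =====
theorem solution_spec : Claim_equal_solution := by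
  intro A _ hpre
  unfold Spec_solution
  match A with
  | [] => exact absurd rfl hpre
  | a :: l => exact main_eq a l
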